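-- pv_equiv track=rewrite | github.com/jmcq89/weapon_comparator | weapon_comparator/compare_weapons.py | get_best_weapon_and_rank_string
-- ===== SOURCE A (Python) =====
-- def get_best_weapon_and_rank_string(sorted_values, sorted_keys):
--     best_weapon = sorted_keys[0]
--     rank_string = best_weapon
--     for index in range(1, len(sorted_values)):
--         if sorted_values[index] == sorted_values[0]:
--             best_weapon += ('=' + sorted_keys[index])
--         if sorted_values[index] == sorted_values[index-1]:
--             rank_string += ('=' + sorted_keys[index])
--         else:
--             rank_string += (', ' + sorted_keys[index])
--     return best_weapon, rank_string
-- ===== SOURCE B (Python) =====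
-- def get_best_weapon_and_rank_string(sorted_values, sorted_keys):
--     first = sorted_keys[0]
--     n = len(sorted_values)
--     if n == 0:
--         return first, first
--     pairs = [(sorted_values[i], sorted_keys[i]) for i in range(n)]
--     v0 = pairs[0][0]
--     best = '='.join([k for v, k in pairs if v == v0])
--     runs, current = [], [pairs[0]]
--     for p in pairs[1:]:
--         if p[0] == current[0][0]:
--             current.append(p)
--         else:
--             runs.append(current)
--             current = [p]
--     runs.append(current)
--     rank = ', '.join(['='.join([k for _, k in run]) for run in runs])
--     return best, rank
-- ===== Notes on version B (the rewrite author's own statement) =====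
-- stated objective: alternative
-- what changed: B builds the (value,key) pair list once and computes the two strings in two separate passes - a filter+join for best_weapon and a run-grouping fold with a nested join for rank_string - instead of A's single interleaved index loop that grows both strings together.
import Mathlib
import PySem

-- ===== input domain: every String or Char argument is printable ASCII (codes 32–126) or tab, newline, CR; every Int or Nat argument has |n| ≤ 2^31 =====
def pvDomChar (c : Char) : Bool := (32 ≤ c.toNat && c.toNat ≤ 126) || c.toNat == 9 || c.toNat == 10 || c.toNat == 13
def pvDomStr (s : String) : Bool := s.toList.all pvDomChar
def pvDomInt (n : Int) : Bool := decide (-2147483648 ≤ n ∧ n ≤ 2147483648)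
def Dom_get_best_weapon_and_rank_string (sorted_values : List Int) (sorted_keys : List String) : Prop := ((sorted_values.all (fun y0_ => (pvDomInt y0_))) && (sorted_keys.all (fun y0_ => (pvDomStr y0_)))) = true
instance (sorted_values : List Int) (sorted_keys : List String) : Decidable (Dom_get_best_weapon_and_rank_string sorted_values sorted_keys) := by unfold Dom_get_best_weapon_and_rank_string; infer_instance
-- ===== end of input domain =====

-- B recomputes the two strings in two separate passes (a filter+join for best_weapon, a
-- run-grouping fold + nested join for rank_string) instead of A's single interleaved
-- index loop; objective: alternative decomposition, same cost.

-- ===== PORT A =====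
-- loop body of A (reads both lists by integer index; in-range under Pre_)
def pvStepA (sorted_values : List Int) (sorted_keys : List String)
    (st : String × String) (index : Int) : String × String :=
  let best := if PySem.List.pyGetD sorted_values index 0 == PySem.List.pyGetD sorted_values 0 0
              then st.1 ++ ("=" ++ PySem.List.pyGetD sorted_keys index "") else st.1
  let rank := if PySem.List.pyGetD sorted_values index 0 == PySem.List.pyGetD sorted_values (index - 1) 0
              then st.2 ++ ("=" ++ PySem.List.pyGetD sorted_keys index "")
              else st.2 ++ (", " ++ PySem.List.pyGetD sorted_keys index "")
  (best, rank)

def get_best_weapon_and_rank_string (sorted_values : List Int) (sorted_keys : List String) : String × String :=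
  let best_weapon := PySem.List.pyGetD sorted_keys 0 ""
  let rank_string := best_weapon
  (PySem.List.pyRange 1 (sorted_values.length : Int) 1).foldl
    (pvStepA sorted_values sorted_keys) (best_weapon, rank_string)

-- ===== PORT B =====
-- loop body of B's run-grouping pass: state = (finished runs, current run)
def pvStepRuns (st : List (List (Int × String)) × List (Int × String)) (p : Int × String) :
    List (List (Int × String)) × List (Int × String) :=
  if p.1 == (st.2.headD (0, "")).1 then (st.1, st.2 ++ [p])
  else (st.1 ++ [st.2], [p])

def get_best_weapon_and_rank_string_alt (sorted_values : List Int) (sorted_keys : List String) : String × String :=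
  let first := PySem.List.pyGetD sorted_keys 0 ""
  let n : Int := sorted_values.length
  if n == 0 then (first, first)
  else
    let pairs := (PySem.List.pyRange 0 n 1).map
      (fun i => (PySem.List.pyGetD sorted_values i 0, PySem.List.pyGetD sorted_keys i ""))
    let v0 := (pairs.headD (0, "")).1
    let best := PySem.Str.join "=" ((pairs.filter (fun p => p.1 == v0)).map Prod.snd)
    let st := (PySem.List.slice pairs (some 1) none).foldl pvStepRuns ([], [pairs.headD (0, "")])
    let runs := st.1 ++ [st.2]
    let rank := PySem.Str.join ", " (runs.map (fun run => PySem.Str.join "=" (run.map Prod.snd)))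
    (best, rank)

-- ===== PRECONDITION & SPEC =====
-- Pre_ excludes exactly the inputs where A raises IndexError: an empty key list
-- (sorted_keys[0]), or a nonempty value list longer than the key list (sorted_keys[index]).
def Pre_get_best_weapon_and_rank_string (sorted_values : List Int) (sorted_keys : List String) : Prop :=
  sorted_keys ≠ [] ∧ (sorted_values = [] ∨ sorted_values.length ≤ sorted_keys.length)
instance (sorted_values : List Int) (sorted_keys : List String) : Decidable (Pre_get_best_weapon_and_rank_string sorted_values sorted_keys) := by unfold Pre_get_best_weapon_and_rank_string; infer_instance

def pvWitness_get_best_weapon_and_rank_string : List Int × List String :=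
  ([5, 5, 3], ["axe", "bow", "club"])

def Spec_get_best_weapon_and_rank_string (sorted_values : List Int) (sorted_keys : List String) (out : String × String) : Prop := out = get_best_weapon_and_rank_string_alt sorted_values sorted_keys
instance (sorted_values : List Int) (sorted_keys : List String) (out : String × String) : Decidable (Spec_get_best_weapon_and_rank_string sorted_values sorted_keys out) := by unfold Spec_get_best_weapon_and_rank_string; infer_instance

-- ===== CLAIM (what is proved, stated in full; the proofs are below) =====
def Claim_equal_get_best_weapon_and_rank_string : Prop := ∀ (sorted_values : List Int) (sorted_keys : List String), Dom_get_best_weapon_and_rank_string sorted_values sorted_keys → Pre_get_best_weapon_and_rank_string sorted_values sorted_keys → Spec_get_best_weapon_and_rank_string sorted_values sorted_keys (get_best_weapon_and_rank_string sorted_values sorted_keys)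

-- ===== LEMMAS AND PROOFS =====

theorem pvJoin_singleton (sep x : String) : PySem.Str.join sep [x] = x := by
  apply String.toList_inj.mp; simp [PySem.Chars.join_singleton]

theorem pvJoin_snoc (sep x : String) (l : List String) (h : l ≠ []) :
    PySem.Str.join sep (l ++ [x]) = PySem.Str.join sep l ++ sep ++ x := by
  apply String.toList_inj.mp
  simp only [PySem.Str.toList_join, List.map_append, List.map_cons, List.map_nil,
    String.toList_append]
  induction l with
  | nil => simp at h
  | cons a t ih =>
    cases t with
    | nil => simp [PySem.Chars.join_cons_cons, PySem.Chars.join_singleton]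
    | cons b t2 =>
      simp only [List.map_cons, List.cons_append, PySem.Chars.join_cons_cons] at *
      rw [ih (by simp)]
      simp

theorem pvJoin_snoc_grow (sep x y : String) (l : List String) :
    PySem.Str.join sep (l ++ [x ++ y]) = PySem.Str.join sep (l ++ [x]) ++ y := by
  cases l with
  | nil =>
    apply String.toList_inj.mp
    simp [PySem.Chars.join_singleton]
  | cons a t =>
    rw [pvJoin_snoc _ _ _ (by simp), pvJoin_snoc _ _ _ (by simp)]
    simp [String.append_assoc]

def pvJoinEq (run : List (Int × String)) : String := PySem.Str.join "=" (run.map Prod.snd)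

def pvRs (v0 : Int) (k0 : String) (ps : List (Int × String)) :
    List (List (Int × String)) × List (Int × String) := ps.foldl pvStepRuns ([], [(v0, k0)])

def pvBest (v0 : Int) (k0 : String) (ps : List (Int × String)) : String :=
  PySem.Str.join "=" ((((v0, k0) :: ps).filter (fun p => p.1 == v0)).map Prod.snd)

def pvRank (v0 : Int) (k0 : String) (ps : List (Int × String)) : String :=
  PySem.Str.join ", " (((pvRs v0 k0 ps).1 ++ [(pvRs v0 k0 ps).2]).map pvJoinEq)

theorem pv_invariant (v0 : Int) (k0 : String) (vs : List Int) (ks : List String)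
    (hlen : vs.length ≤ ks.length) (m : Nat) (hm : m ≤ vs.length) :
    (PySem.List.pyRange 1 (1 + (m : Int)) 1).foldl (pvStepA (v0 :: vs) (k0 :: ks)) (k0, k0)
      = (pvBest v0 k0 ((vs.zip ks).take m), pvRank v0 k0 ((vs.zip ks).take m))
    ∧ (pvRs v0 k0 ((vs.zip ks).take m)).2 ≠ []
    ∧ ((pvRs v0 k0 ((vs.zip ks).take m)).2.headD (0, "")).1
        = PySem.List.pyGetD (v0 :: vs) (m : Int) 0 := by
  induction m with
  | zero =>
    refine ⟨?_, by simp [pvRs], by simp [pvRs, PySem.List.pyGetD_zero_cons]⟩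
    simp [pvBest, pvRank, pvRs, pvJoinEq, PySem.List.pyRange_one_eq_nil, pvJoin_singleton]
  | succ m ih =>
    have hm' : m < vs.length := by omega
    have hk' : m < ks.length := by omega
    obtain ⟨h1, h2, h3⟩ := ih (by omega)
    have hzm : (vs.zip ks).take (m+1) = (vs.zip ks).take m ++ [(vs[m], ks[m])] := by
      rw [List.take_add_one]
      simp [List.length_zip, Nat.lt_min.mpr ⟨hm', hk'⟩, List.getElem_zip]
    have hrange : PySem.List.pyRange 1 (1 + ((m+1 : Nat) : Int)) 1
        = PySem.List.pyRange 1 (1 + (m : Int)) 1 ++ [1 + (m : Int)] := by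
      have := PySem.List.pyRange_one_succ_right (a := 1) (b := 1 + (m : Int)) (by omega)
      rw [← this]; push_cast; ring_nf
    have gv : PySem.List.pyGetD (v0 :: vs) (1 + (m : Int)) 0 = vs[m] := by
      have h : (1 + (m : Int)) = ((m+1 : Nat) : Int) := by push_cast; ring
      rw [h, PySem.List.pyGetD_natCast]
      simp [List.getD_eq_getElem?_getD, hm']
    have gk : PySem.List.pyGetD (k0 :: ks) (1 + (m : Int)) "" = ks[m] := by
      have h : (1 + (m : Int)) = ((m+1 : Nat) : Int) := by push_cast; ring
      rw [h, PySem.List.pyGetD_natCast]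
      simp [List.getD_eq_getElem?_getD, hk']
    have gprev : PySem.List.pyGetD (v0 :: vs) (1 + (m : Int) - 1) 0
        = ((pvRs v0 k0 ((vs.zip ks).take m)).2.headD (0, "")).1 := by
      rw [h3]; norm_num
    have g0 : PySem.List.pyGetD (v0 :: vs) 0 0 = v0 := by
      simp [PySem.List.pyGetD_zero_cons]
    rw [hrange, List.foldl_append, h1]
    simp only [List.foldl_cons, List.foldl_nil]
    rw [hzm]
    obtain ⟨c, C', hC⟩ := List.exists_cons_of_ne_nil h2
    have hrs : pvRs v0 k0 (List.take m (vs.zip ks) ++ [(vs[m], ks[m])])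
        = pvStepRuns (pvRs v0 k0 (List.take m (vs.zip ks))) (vs[m], ks[m]) := by
      simp [pvRs, List.foldl_append]
    have hgm1 : PySem.List.pyGetD (v0 :: vs) (((m : Nat) + 1 : Nat) : Int) 0 = vs[m] := by
      rw [PySem.List.pyGetD_natCast]; simp [List.getD_eq_getElem?_getD, hm']
    have hbest : (if (vs[m] == v0) = true
          then pvBest v0 k0 (List.take m (vs.zip ks)) ++ ("=" ++ ks[m])
          else pvBest v0 k0 (List.take m (vs.zip ks)))
        = pvBest v0 k0 (List.take m (vs.zip ks) ++ [(vs[m], ks[m])]) := by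
      by_cases hb : (vs[m] == v0) = true
      · rw [if_pos hb]
        unfold pvBest
        rw [← List.cons_append, List.filter_append, List.map_append]
        rw [show List.filter (fun p => p.1 == v0) [((vs[m] : Int), ks[m])]
            = [(vs[m], ks[m])] from by simp only [List.filter, hb]]
        rw [show List.map Prod.snd [((vs[m] : Int), ks[m])] = [ks[m]] from rfl]
        rw [pvJoin_snoc _ _ _ (by simp)]
        rw [String.append_assoc]
      · rw [if_neg hb]
        unfold pvBest
        rw [← List.cons_append, List.filter_append]
        rw [show List.filter (fun p => p.1 == v0) [((vs[m] : Int), ks[m])]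
            = [] from by simp only [List.filter, hb]]
        simp
    by_cases hr : (vs[m] == ((pvRs v0 k0 (List.take m (vs.zip ks))).2.headD (0, "")).1) = true
    · have hrv : vs[m] = ((pvRs v0 k0 (List.take m (vs.zip ks))).2.headD (0, "")).1 :=
        eq_of_beq hr
      have hstep : pvStepRuns (pvRs v0 k0 (List.take m (vs.zip ks))) (vs[m], ks[m])
          = ((pvRs v0 k0 (List.take m (vs.zip ks))).1,
             (pvRs v0 k0 (List.take m (vs.zip ks))).2 ++ [(vs[m], ks[m])]) := by
        have h' : vs[m] = c.1 := by rw [hC] at hrv; simpa using hrv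
        simp [pvStepRuns, hC, h']
      refine ⟨?_, ?_, ?_⟩
      · simp only [pvStepA, gv, gk, g0, gprev, Prod.mk.injEq]
        refine ⟨hbest, ?_⟩
        rw [if_pos hr]
        unfold pvRank
        rw [hrs, hstep]
        simp only [List.map_append, List.map_cons, List.map_nil]
        rw [show pvJoinEq ((pvRs v0 k0 (List.take m (vs.zip ks))).2 ++ [(vs[m], ks[m])])
            = pvJoinEq ((pvRs v0 k0 (List.take m (vs.zip ks))).2) ++ ("=" ++ ks[m]) from by
          unfold pvJoinEq
          rw [List.map_append,
            show List.map Prod.snd [((vs[m] : Int), ks[m])] = [ks[m]] from rfl,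
            pvJoin_snoc _ _ _ (by rw [hC]; simp), String.append_assoc]]
        rw [pvJoin_snoc_grow]
      · rw [hrs, hstep]; simp
      · rw [hrs, hstep, hgm1, hC]
        have := hrv
        rw [hC] at this
        simpa using this.symm
    · have hrv : ¬ (vs[m] = ((pvRs v0 k0 (List.take m (vs.zip ks))).2.headD (0, "")).1) := by
        simpa using hr
      have hstep : pvStepRuns (pvRs v0 k0 (List.take m (vs.zip ks))) (vs[m], ks[m])
          = ((pvRs v0 k0 (List.take m (vs.zip ks))).1 ++ [(pvRs v0 k0 (List.take m (vs.zip ks))).2],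
             [(vs[m], ks[m])]) := by
        have h' : ¬ vs[m] = c.1 := by rw [hC] at hrv; simpa using hrv
        simp [pvStepRuns, hC, h']
      refine ⟨?_, ?_, ?_⟩
      · simp only [pvStepA, gv, gk, g0, gprev, Prod.mk.injEq]
        refine ⟨hbest, ?_⟩
        rw [if_neg hr]
        unfold pvRank
        rw [hrs, hstep]
        simp only [List.map_append, List.map_cons, List.map_nil]
        rw [show pvJoinEq [((vs[m] : Int), ks[m])] = ks[m] from by
          unfold pvJoinEq; exact pvJoin_singleton _ _]
        rw [pvJoin_snoc ", " (ks[m])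
          (List.map pvJoinEq (pvRs v0 k0 (List.take m (vs.zip ks))).1
            ++ [pvJoinEq (pvRs v0 k0 (List.take m (vs.zip ks))).2]) (by simp),
          String.append_assoc]
      · rw [hrs, hstep]; simp
      · rw [hrs, hstep, hgm1]
        simp

theorem pv_pairs_eq (vals : List Int) (keys : List String) (h : vals.length ≤ keys.length) :
    (PySem.List.pyRange 0 (vals.length : Int) 1).map
      (fun i => (PySem.List.pyGetD vals i 0, PySem.List.pyGetD keys i "")) = vals.zip keys := by
  apply List.ext_getElem
  · simp [PySem.List.length_pyRange_one, List.length_zip, Nat.min_eq_left h]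
  · intro k h1 h2
    have hk : k < vals.length := by
      simpa [PySem.List.length_pyRange_one] using h1
    have hk2 : k < keys.length := lt_of_lt_of_le hk h
    simp only [List.getElem_map, PySem.List.getElem_pyRange_one, List.getElem_zip]
    rw [zero_add]
    simp [PySem.List.pyGetD_natCast, List.getD_eq_getElem?_getD, hk, hk2]

theorem pv_final (sorted_values : List Int) (sorted_keys : List String)
    (hk : sorted_keys ≠ [])
    (hv : sorted_values = [] ∨ sorted_values.length ≤ sorted_keys.length) :
    get_best_weapon_and_rank_string sorted_values sorted_keys
      = get_best_weapon_and_rank_string_alt sorted_values sorted_keys := by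
  match sorted_values, sorted_keys with
  | _, [] => exact absurd rfl hk
  | [], k0 :: ks =>
    simp [get_best_weapon_and_rank_string, get_best_weapon_and_rank_string_alt,
      PySem.List.pyRange_one_eq_nil]
  | v0 :: vs, k0 :: ks =>
    have hlen : vs.length ≤ ks.length := by
      rcases hv with h | h
      · exact absurd h (by simp)
      · simpa using h
    have hcast : (((v0 :: vs).length : Nat) : Int) = 1 + (vs.length : Int) := by
      simp [List.length_cons]; ring
    have htake : (vs.zip ks).take vs.length = vs.zip ks :=
      List.take_of_length_le (by simp [List.length_zip])
    have hinv := (pv_invariant v0 k0 vs ks hlen vs.length le_rfl).1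
    rw [htake] at hinv
    have hA : get_best_weapon_and_rank_string (v0 :: vs) (k0 :: ks)
        = (pvBest v0 k0 (vs.zip ks), pvRank v0 k0 (vs.zip ks)) := by
      unfold get_best_weapon_and_rank_string
      rw [hcast]
      simpa [PySem.List.pyGetD_zero_cons] using hinv
    have hpairs := pv_pairs_eq (v0 :: vs) (k0 :: ks) (by simpa using hlen)
    have hB : get_best_weapon_and_rank_string_alt (v0 :: vs) (k0 :: ks)
        = (pvBest v0 k0 (vs.zip ks), pvRank v0 k0 (vs.zip ks)) := by
      unfold get_best_weapon_and_rank_string_alt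
      simp only [hpairs, PySem.List.slice_from_one]
      have hne : ((vs.length : Int) + 1) ≠ 0 := by omega
      have hJd : pvJoinEq = fun run : List (Int × String) =>
          PySem.Str.join "=" (run.map Prod.snd) := rfl
      simp [pvBest, pvRank, pvRs, hJd, List.zip_cons_cons, hne]
    rw [hA, hB]

-- ===== VERDICT (by name: the statement is the Claim_ definition above) =====
theorem get_best_weapon_and_rank_string_spec : Claim_equal_get_best_weapon_and_rank_string := by
  intro sorted_values sorted_keys _ hpre
  unfold Spec_get_best_weapon_and_rank_string
  exact pv_final sorted_values sorted_keys hpre.1 hpre.2
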